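-- pv_equiv track=rewrite | github.com/ShivenA99/GamED-AI | backend/app/agents/workflows/trace_path_workflow.py | _find_zone_by_label
-- ===== SOURCE A (Python) =====
-- from typing import Dict, Any, List, Optional
--
-- def _find_zone_by_label(zones: List[Dict], label: str) -> Optional[Dict]:
--     """Find a zone by its label (case-insensitive, partial match)."""
--     label_lower = label.lower().strip()
--
--     # Exact match first
--     for zone in zones:
--         zone_label = zone.get("label", "").lower().strip()
--         if zone_label == label_lower:
--             return zone
--
--     # Partial match (label contains or is contained)
--     for zone in zones:
--         zone_label = zone.get("label", "").lower().strip()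
--         if label_lower in zone_label or zone_label in label_lower:
--             return zone
--
--     # Word-based match
--     label_words = set(label_lower.split())
--     for zone in zones:
--         zone_label = zone.get("label", "").lower().strip()
--         zone_words = set(zone_label.split())
--         if label_words & zone_words:  # Any common words
--             return zone
--
--     return None
-- ===== SOURCE B (Python) =====
-- from typing import Dict, Any, List, Optional
--
-- def _find_zone_by_label(zones: List[Dict], label: str) -> Optional[Dict]:
--     """Single pass: return immediately on exact match; otherwise remember the
--     first partial-match and the first word-overlap candidates, and pick
--     partial > word > None afterwards."""
--     label_lower = label.lower().strip()
--     label_words = set(label_lower.split())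
--     partial = None
--     word = None
--     for zone in zones:
--         zone_label = zone.get("label", "").lower().strip()
--         if zone_label == label_lower:
--             return zone
--         if partial is None and (label_lower in zone_label or zone_label in label_lower):
--             partial = zone
--         if word is None and (label_words & set(zone_label.split())):
--             word = zone
--     return partial if partial is not None else word
-- ===== Notes on version B (the rewrite author's own statement) =====
-- stated objective: alternative
-- what changed: Replaces A's three sequential scans (each re-normalizing every zone label) with one loop that normalizes each label once, returns on exact match, and stashes the first partial and first word-overlap candidates; it trades repeated passes for two Optional accumulators.
import Mathlib
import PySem

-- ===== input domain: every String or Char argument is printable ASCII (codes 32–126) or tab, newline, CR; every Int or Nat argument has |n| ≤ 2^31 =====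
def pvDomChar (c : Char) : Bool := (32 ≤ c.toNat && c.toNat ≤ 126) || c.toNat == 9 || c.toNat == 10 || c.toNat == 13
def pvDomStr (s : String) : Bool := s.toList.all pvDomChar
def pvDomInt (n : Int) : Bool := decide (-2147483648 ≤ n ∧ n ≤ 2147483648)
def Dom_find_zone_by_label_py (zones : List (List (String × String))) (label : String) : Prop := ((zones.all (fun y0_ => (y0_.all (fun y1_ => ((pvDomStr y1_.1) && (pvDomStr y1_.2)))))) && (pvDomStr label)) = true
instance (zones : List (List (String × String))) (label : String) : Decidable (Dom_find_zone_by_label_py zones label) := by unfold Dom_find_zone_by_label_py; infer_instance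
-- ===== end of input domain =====

-- B makes one pass over the zones instead of A's three sequential scans: it returns on an
-- exact match and stashes the first partial / word-overlap candidates (alternative decomposition).

-- shared helpers: the three match tests of the Python
-- zone.get("label", "").lower().strip()
def pvZoneLabel (z : List (String × String)) : String :=
  PySem.Str.strip (PySem.Str.lower (PySem.Dict.getD ⟨z⟩ "label" ""))
-- zone_label == label_lower
def pvExactP (ll : String) (z : List (String × String)) : Bool := pvZoneLabel z == ll
-- label_lower in zone_label or zone_label in label_lower
def pvPartP (ll : String) (z : List (String × String)) : Bool :=
  PySem.Str.isIn ll (pvZoneLabel z) || PySem.Str.isIn (pvZoneLabel z) ll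
-- label_words & zone_words (set intersection nonempty)
def pvWordP (lw : PySem.Set String) (z : List (String × String)) : Bool :=
  !(PySem.Set.inter lw (PySem.Set.ofList (PySem.Str.split₀ (pvZoneLabel z)))).isEmpty

-- ===== PORT A =====
def find_zone_by_label_py (zones : List (List (String × String))) (label : String) : Option (List (String × String)) :=
  let label_lower := PySem.Str.strip (PySem.Str.lower label)
  -- exact match first
  match zones.find? (fun z => pvExactP label_lower z) with
  | some z => some z
  | none =>
    -- partial match
    match zones.find? (fun z => pvPartP label_lower z) with
    | some z => some z
    | none =>
      -- word-based match
      let label_words : PySem.Set String := PySem.Set.ofList (PySem.Str.split₀ label_lower)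
      zones.find? (fun z => pvWordP label_words z)

-- ===== PORT B =====
-- the single loop: return on exact match, else keep first partial / first word candidates
def pvAltGo (ll : String) (lw : PySem.Set String) :
    List (List (String × String)) → Option (List (String × String)) → Option (List (String × String)) → Option (List (String × String))
  | [], p, w => p.or w
  | z :: rest, p, w =>
    if pvExactP ll z then some z
    else
      let p' := if p.isNone && pvPartP ll z then some z else p
      let w' := if w.isNone && pvWordP lw z then some z else w
      pvAltGo ll lw rest p' w'

def find_zone_by_label_py_alt (zones : List (List (String × String))) (label : String) : Option (List (String × String)) :=
  let label_lower := PySem.Str.strip (PySem.Str.lower label)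
  let label_words : PySem.Set String := PySem.Set.ofList (PySem.Str.split₀ label_lower)
  pvAltGo label_lower label_words zones none none

-- ===== PRECONDITION & SPEC =====
def Spec_find_zone_by_label_py (zones : List (List (String × String))) (label : String) (out : Option (List (String × String))) : Prop := out = find_zone_by_label_py_alt zones label
instance (zones : List (List (String × String))) (label : String) (out : Option (List (String × String))) : Decidable (Spec_find_zone_by_label_py zones label out) := by unfold Spec_find_zone_by_label_py; infer_instance

-- ===== CLAIM (what is proved, stated in full; the proofs are below) =====
def Claim_equal_find_zone_by_label_py : Prop := ∀ (zones : List (List (String × String))) (label : String), Dom_find_zone_by_label_py zones label → Spec_find_zone_by_label_py zones label (find_zone_by_label_py zones label)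

-- ===== LEMMAS AND PROOFS =====

-- B's loop computes: first exact match if any, else (p or first partial) or (w or first word)
theorem pvAltGo_spec (ll : String) (lw : PySem.Set String)
    (zs : List (List (String × String))) (p w : Option (List (String × String))) :
    pvAltGo ll lw zs p w =
      match zs.find? (fun z => pvExactP ll z) with
      | some z => some z
      | none =>
        (p.or (zs.find? (fun z => pvPartP ll z))).or (w.or (zs.find? (fun z => pvWordP lw z))) := by
  induction zs generalizing p w with
  | nil => simp [pvAltGo, List.find?]
  | cons z rest ih =>
    simp only [pvAltGo, List.find?_cons]
    cases hE : pvExactP ll z with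
    | true => simp
    | false =>
      simp only [Bool.false_eq_true, if_false, ih]
      cases hfe : rest.find? (fun z => pvExactP ll z) with
      | some z' => rfl
      | none =>
        cases p with
        | some pv =>
          cases hP : pvPartP ll z <;> simp [Option.or]
        | none =>
          cases hP : pvPartP ll z with
          | true => cases w <;> simp [Option.or]
          | false =>
            cases w with
            | some wv => cases hW : pvWordP lw z <;> simp [Option.or]
            | none => cases hW : pvWordP lw z <;> simp [Option.or]

-- ===== VERDICT (by name: the statement is the Claim_ definition above) =====
theorem find_zone_by_label_py_spec : Claim_equal_find_zone_by_label_py := by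
  intro zones label _
  unfold Spec_find_zone_by_label_py find_zone_by_label_py find_zone_by_label_py_alt
  rw [pvAltGo_spec]
  cases h1 : List.find? (fun z => pvExactP (PySem.Str.strip (PySem.Str.lower label)) z) zones with
  | some z => simp [h1]
  | none =>
    cases h2 : List.find? (fun z => pvPartP (PySem.Str.strip (PySem.Str.lower label)) z) zones with
    | some z => simp [h1, h2, Option.or]
    | none => simp [h1, h2, Option.or]
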